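-- pv_equiv track=rewrite | github.com/mortyc126-debug/SHA | weapon_algebraic.py | enumerate_subspace
-- ===== SOURCE A (Python) =====
-- def enumerate_subspace(base, directions):
--     """Yield all 2^dim points in the affine subspace."""
--     dim = len(directions)
--     for mask in range(1 << dim):
--         msg = list(base)
--         for i in range(dim):
--             if (mask >> i) & 1:
--                 w, b = directions[i]
--                 msg[w] ^= (1 << b)
--         yield msg
-- ===== SOURCE B (Python) =====
-- def enumerate_subspace(base, directions):
--     """Yield all 2^dim points in the affine subspace (subset-doubling order = mask order)."""
--     pts = [list(base)]
--     for w, b in directions: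
--         t = 1 << b
--         nxt = []
--         for p in pts:
--             q = list(p)
--             q[w] ^= t
--             nxt.append(q)
--         pts += nxt
--     yield from pts
-- ===== Notes on version B (the rewrite author's own statement) =====
-- stated objective: alternative
-- what changed: Replaces A's per-mask rebuild (copy base and re-scan all dim directions for every one of the 2^dim masks) by subset-doubling: start from [base] and, for each direction in order, append one-toggle copies of every point built so far, producing the same sequence of points with one toggle per emitted point.
import Mathlib
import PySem

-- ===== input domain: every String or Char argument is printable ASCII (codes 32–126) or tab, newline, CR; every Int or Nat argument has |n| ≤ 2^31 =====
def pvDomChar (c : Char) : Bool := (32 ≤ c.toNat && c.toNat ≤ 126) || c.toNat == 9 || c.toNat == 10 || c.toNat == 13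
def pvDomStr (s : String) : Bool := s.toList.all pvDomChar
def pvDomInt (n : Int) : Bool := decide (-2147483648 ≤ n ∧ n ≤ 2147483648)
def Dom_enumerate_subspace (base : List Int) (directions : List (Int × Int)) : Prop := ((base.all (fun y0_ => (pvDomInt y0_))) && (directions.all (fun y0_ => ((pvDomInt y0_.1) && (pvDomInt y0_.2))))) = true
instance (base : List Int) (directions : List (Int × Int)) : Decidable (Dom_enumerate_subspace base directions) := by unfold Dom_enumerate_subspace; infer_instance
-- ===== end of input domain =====

-- B replaces A's rebuild-each-point-from-base nested loop (every mask re-scans all dim directions)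
-- by subset-doubling: each new point is ONE toggle of an already-built point, in the same output order.
-- A is a generator; equivalence is about the sequence of yielded values.

-- shared primitive: Python's '1 << b' (b ≥ 0 under Pre_)
def pvPow2 (b : Int) : Int := (1 : Int) <<< b.toNat

-- ===== PORT A =====
-- for mask in range(1 << dim): msg = list(base); for i in range(dim): if (mask >> i) & 1: w,b = directions[i]; msg[w] ^= (1 << b); yield msg
def enumerate_subspace (base : List Int) (directions : List (Int × Int)) : List (List Int) :=
  let dim := directions.length
  (PySem.List.pyRange 0 ((1 : Int) <<< dim) 1).map (fun mask =>
    (PySem.List.pyRange 0 (dim : Int) 1).foldl (fun msg i =>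
      if PySem.Int.band (mask >>> i.toNat) 1 ≠ 0 then
        let wb := PySem.List.pyGetD directions i (0, 0)
        PySem.List.pySetD msg wb.1
          (PySem.Int.bxor (PySem.List.pyGetD msg wb.1 0) (pvPow2 wb.2))
      else msg) base)

-- ===== PORT B =====
-- pts = [list(base)]; for w,b in directions: pts += [toggle of p for p in pts]; yield from pts
def enumerate_subspace_alt (base : List Int) (directions : List (Int × Int)) : List (List Int) :=
  directions.foldl (fun pts d =>
    pts ++ pts.map (fun p =>
      PySem.List.pySetD p d.1
        (PySem.Int.bxor (PySem.List.pyGetD p d.1 0) (pvPow2 d.2))))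
    [base]

-- ===== PRECONDITION & SPEC =====
-- Pre_ excludes exactly the inputs where Python A raises when consumed: a direction with a
-- negative shift amount b (ValueError on 1 << b) or a target index w out of range for base
-- (IndexError on msg[w]); every direction is applied on some mask, so any bad direction raises.
def Pre_enumerate_subspace (base : List Int) (directions : List (Int × Int)) : Prop :=
  ∀ wb ∈ directions, 0 ≤ wb.2 ∧ PySem.Raise.InRange base.length wb.1
instance (base : List Int) (directions : List (Int × Int)) : Decidable (Pre_enumerate_subspace base directions) := by unfold Pre_enumerate_subspace; infer_instance
def pvWitness_enumerate_subspace : List Int × (List (Int × Int)) := ([0, 5], [(0, 1), (1, 3)])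
def Spec_enumerate_subspace (base : List Int) (directions : List (Int × Int)) (out : List (List Int)) : Prop := out = enumerate_subspace_alt base directions
instance (base : List Int) (directions : List (Int × Int)) (out : List (List Int)) : Decidable (Spec_enumerate_subspace base directions out) := by unfold Spec_enumerate_subspace; infer_instance

-- ===== CLAIM =====
def Claim_equal_enumerate_subspace : Prop := ∀ (base : List Int) (directions : List (Int × Int)), Dom_enumerate_subspace base directions → Pre_enumerate_subspace base directions → Spec_enumerate_subspace base directions (enumerate_subspace base directions)

-- ===== LEMMAS AND PROOFS =====

-- one toggle msg[w] ^= (1 << b)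
def pvTog (d : Int × Int) (p : List Int) : List Int :=
  PySem.List.pySetD p d.1 (PySem.Int.bxor (PySem.List.pyGetD p d.1 0) (pvPow2 d.2))

-- A's inner loop, over a Nat mask
def pvApplyMask (dirs : List (Int × Int)) (m : Nat) (base : List Int) : List Int :=
  (List.range dirs.length).foldl (fun msg i =>
    if m / 2 ^ i % 2 = 1 then pvTog (dirs.getD i (0, 0)) msg else msg) base

theorem pv_shiftRight_natCast (m i : Nat) : ((m : Int) >>> i) = ((m >>> i : Nat) : Int) := by
  simp [Int.shiftRight_eq_div_pow, Nat.shiftRight_eq_div_pow]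

theorem pv_bit_iff (m i : Nat) : (PySem.Int.band ((m : Int) >>> i) 1 ≠ 0) ↔ (m / 2 ^ i % 2 = 1) := by
  have h1 : (1 : Int) = ((1 : Nat) : Int) := rfl
  rw [pv_shiftRight_natCast, h1, PySem.Int.band_natCast, Nat.and_one_is_mod,
    Nat.shiftRight_eq_div_pow]
  constructor
  · intro hx; omega
  · intro hx; omega

theorem pv_A_eq (base : List Int) (dirs : List (Int × Int)) :
    enumerate_subspace base dirs
      = (List.range (2 ^ dirs.length)).map (fun m => pvApplyMask dirs m base) := by
  simp only [enumerate_subspace]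
  have hpow : (1 : Int) <<< dirs.length = ((2 ^ dirs.length : Nat) : Int) := by
    simp [Int.shiftLeft_eq]
  rw [hpow]
  simp only [PySem.List.pyRange_zero_nat, List.map_map, List.foldl_map]
  refine List.map_congr_left (fun m _ => ?_)
  unfold pvApplyMask
  refine PySem.List.foldl_congr_mem _ _ _ _ (fun msg i _ => ?_)
  simp only [Int.toNat_natCast, PySem.List.pyGetD_natCast]
  by_cases hb : m / 2 ^ i % 2 = 1
  · rw [if_pos ((pv_bit_iff m i).mpr hb), if_pos hb]
    rfl
  · rw [if_neg (fun hc => hb ((pv_bit_iff m i).mp hc)), if_neg hb]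

theorem pv_applyMask_low (dirs : List (Int × Int)) (d : Int × Int) (m : Nat)
    (hm : m < 2 ^ dirs.length) (base : List Int) :
    pvApplyMask (dirs ++ [d]) m base = pvApplyMask dirs m base := by
  unfold pvApplyMask
  rw [List.length_append, List.length_singleton, List.range_succ, List.foldl_append]
  have hhi : m / 2 ^ dirs.length % 2 ≠ 1 := by
    have : m / 2 ^ dirs.length = 0 := Nat.div_eq_of_lt hm
    omega
  rw [List.foldl_cons, List.foldl_nil, if_neg hhi]
  refine PySem.List.foldl_congr_mem _ _ _ _ (fun msg i hi => ?_)
  have hilt : i < dirs.length := List.mem_range.mp hi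
  rw [List.getD_append _ _ _ _ hilt]

theorem pv_applyMask_high (dirs : List (Int × Int)) (d : Int × Int) (m : Nat)
    (hm : m < 2 ^ dirs.length) (base : List Int) :
    pvApplyMask (dirs ++ [d]) (2 ^ dirs.length + m) base = pvTog d (pvApplyMask dirs m base) := by
  unfold pvApplyMask
  rw [List.length_append, List.length_singleton, List.range_succ, List.foldl_append]
  have hhi : (2 ^ dirs.length + m) / 2 ^ dirs.length % 2 = 1 := by
    have h0 : m / 2 ^ dirs.length = 0 := Nat.div_eq_of_lt hm
    have := Nat.add_div_left m (Nat.pos_of_ne_zero (fun h => by simp [h] at hm) : 0 < 2 ^ dirs.length)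
    omega
  have hd : (dirs ++ [d]).getD dirs.length (0, 0) = d := by simp [List.getD]
  rw [List.foldl_cons, List.foldl_nil, if_pos hhi, hd]
  congr 1
  refine PySem.List.foldl_congr_mem _ _ _ _ (fun msg i hi => ?_)
  have hilt : i < dirs.length := List.mem_range.mp hi
  have hbit : (2 ^ dirs.length + m) / 2 ^ i % 2 = m / 2 ^ i % 2 := by
    have hsplit : 2 ^ dirs.length = 2 ^ (dirs.length - i - 1) * 2 * 2 ^ i := by
      rw [mul_assoc, ← pow_succ', ← pow_add]
      congr 1
      omega
    rw [hsplit, Nat.add_comm, Nat.add_mul_div_right _ _ (Nat.two_pow_pos i),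
      Nat.add_mul_mod_self_right]
  rw [hbit, List.getD_append _ _ _ _ hilt]

theorem pv_B_snoc (base : List Int) (dirs : List (Int × Int)) (d : Int × Int) :
    enumerate_subspace_alt base (dirs ++ [d])
      = enumerate_subspace_alt base dirs ++ (enumerate_subspace_alt base dirs).map (pvTog d) := by
  unfold enumerate_subspace_alt
  rw [List.foldl_append, List.foldl_cons, List.foldl_nil]
  rfl

theorem pv_main (base : List Int) (dirs : List (Int × Int)) :
    enumerate_subspace base dirs = enumerate_subspace_alt base dirs := by
  induction dirs using List.reverseRecOn with
  | nil => rfl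
  | append_singleton dirs d ih =>
    rw [pv_A_eq] at ih ⊢
    rw [pv_B_snoc, ← ih]
    rw [List.length_append, List.length_singleton, pow_succ, Nat.mul_two, List.range_add,
      List.map_append, List.map_map]
    congr 1
    · exact List.map_congr_left fun m hm =>
        pv_applyMask_low dirs d m (List.mem_range.mp hm) base
    · rw [List.map_map]
      refine List.map_congr_left fun m hm => ?_
      simp only [Function.comp_apply]
      exact pv_applyMask_high dirs d m (List.mem_range.mp hm) base

-- ===== VERDICT =====
theorem enumerate_subspace_spec : Claim_equal_enumerate_subspace := by
  intro base directions _ _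
  unfold Spec_enumerate_subspace
  exact pv_main base directions
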